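-- pv_equiv track=rewrite | github.com/wenjie-shi-alpha/Cyclone_next | scripts/eval_strict_forecast_heldout.py | _apply_user_prompt_override
-- ===== SOURCE A (Python) =====
-- from typing import Any, Mapping
--
-- def _apply_user_prompt_override(
--     messages: list[dict[str, Any]],
--     override_prompt: str,
-- ) -> list[dict[str, Any]]:
--     updated = [dict(message) for message in messages]
--     for index in range(len(updated) - 1, -1, -1):
--         if updated[index].get("role") == "user":
--             updated[index]["content"] = override_prompt
--             return updated
--     raise ValueError("Prompt override requested for a sample without a user message.")
-- ===== SOURCE B (Python) =====
-- def _apply_user_prompt_override(messages, override_prompt):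
--     last_user = -1
--     for index, message in enumerate(messages):
--         if message.get("role") == "user":
--             last_user = index
--     if last_user == -1:
--         raise ValueError("Prompt override requested for a sample without a user message.")
--     return [
--         {**message, "content": override_prompt} if index == last_user else dict(message)
--         for index, message in enumerate(messages)
--     ]
-- ===== Notes on version B (the rewrite author's own statement) =====
-- stated objective: alternative
-- what changed: A copies every dict up front and mutates the copy found by a backward early-return scan; B does a forward locate pass recording the last user index and then rebuilds the output in one comprehension, overriding only at that index.
import Mathlib
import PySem

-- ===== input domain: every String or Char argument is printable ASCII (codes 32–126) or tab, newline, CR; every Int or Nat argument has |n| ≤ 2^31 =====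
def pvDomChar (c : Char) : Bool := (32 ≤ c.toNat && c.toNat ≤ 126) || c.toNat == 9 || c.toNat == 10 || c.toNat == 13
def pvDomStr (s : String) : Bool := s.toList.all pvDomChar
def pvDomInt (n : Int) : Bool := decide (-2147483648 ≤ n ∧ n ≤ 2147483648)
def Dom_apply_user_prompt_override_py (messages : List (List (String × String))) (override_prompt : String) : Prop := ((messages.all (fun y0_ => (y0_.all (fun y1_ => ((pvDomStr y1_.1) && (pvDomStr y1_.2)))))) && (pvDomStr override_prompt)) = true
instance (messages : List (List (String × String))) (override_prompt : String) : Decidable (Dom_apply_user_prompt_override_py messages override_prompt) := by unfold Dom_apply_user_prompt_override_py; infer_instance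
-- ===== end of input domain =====

-- B replaces A's copy-then-mutate backward early-return scan by a forward pass recording the
-- last user index and a rebuild comprehension overriding only at that index (alternative decomposition;
-- return-value equivalence, neither version mutates its argument observably through the return).

-- ===== PORT A =====
-- backward loop 'for index in range(len(updated)-1, -1, -1)': structural countdown on the index;
-- fuel n+1 inspects index n; n = 0 fell through the loop = Python raises ValueError (excluded by Pre_),
-- the port returns the copied list there.
def pvAGo (updated : List (PySem.Dict String String)) (override_prompt : String) : Nat → List (PySem.Dict String String)
  | 0 => updated
  | n + 1 =>
    match updated[n]? with
    | some d =>
      if d.get? "role" == some "user" then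
        updated.set n (d.insert "content" override_prompt)
      else
        pvAGo updated override_prompt n
    | none => pvAGo updated override_prompt n

def apply_user_prompt_override_py (messages : List (List (String × String))) (override_prompt : String) : List (List (String × String)) :=
  let updated := messages.map (fun m => PySem.Dict.ofList m)
  (pvAGo updated override_prompt updated.length).map (fun d => d.items)

-- ===== PORT B =====
def apply_user_prompt_override_py_alt (messages : List (List (String × String))) (override_prompt : String) : List (List (String × String)) :=
  let last_user : Int :=
    (PySem.List.enumerate messages 0).foldl
      (fun acc im => if (PySem.Dict.ofList im.2).get? "role" == some "user" then im.1 else acc) (-1)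
  -- Python raises ValueError when last_user == -1 (excluded by Pre_); the comprehension below
  -- then overrides nothing, since no enumerate index equals -1.
  (PySem.List.enumerate messages 0).map
    (fun im =>
      if im.1 == last_user then ((PySem.Dict.ofList im.2).insert "content" override_prompt).items
      else (PySem.Dict.ofList im.2).items)

-- ===== PRECONDITION & SPEC =====
-- Pre_ excludes exactly the inputs with no user message, on which A raises ValueError.
def Pre_apply_user_prompt_override_py (messages : List (List (String × String))) (override_prompt : String) : Prop :=
  ∃ m ∈ messages, (PySem.Dict.ofList m).get? "role" = some "user"
instance (messages : List (List (String × String))) (override_prompt : String) : Decidable (Pre_apply_user_prompt_override_py messages override_prompt) := by unfold Pre_apply_user_prompt_override_py; infer_instance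

def pvWitness_apply_user_prompt_override_py : (List (List (String × String))) × String :=
  ([[("role", "user"), ("content", "hi")]], "override")

def Spec_apply_user_prompt_override_py (messages : List (List (String × String))) (override_prompt : String) (out : List (List (String × String))) : Prop := out = apply_user_prompt_override_py_alt messages override_prompt
instance (messages : List (List (String × String))) (override_prompt : String) (out : List (List (String × String))) : Decidable (Spec_apply_user_prompt_override_py messages override_prompt out) := by unfold Spec_apply_user_prompt_override_py; infer_instance

-- ===== CLAIM (what is proved, stated in full; the proofs are below) =====
def Claim_equal_apply_user_prompt_override_py : Prop := ∀ (messages : List (List (String × String))) (override_prompt : String), Dom_apply_user_prompt_override_py messages override_prompt → Pre_apply_user_prompt_override_py messages override_prompt → Spec_apply_user_prompt_override_py messages override_prompt (apply_user_prompt_override_py messages override_prompt)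

-- ===== LEMMAS AND PROOFS =====

-- index of the last element satisfying P
def pvLastIdx {α : Type} (P : α → Bool) : List α → Option Nat
  | [] => none
  | x :: t =>
    match pvLastIdx P t with
    | some j => some (j + 1)
    | none => if P x then some 0 else none

theorem pvLastIdx_lt {α : Type} (P : α → Bool) (l : List α) (j : Nat)
    (h : pvLastIdx P l = some j) : j < l.length := by
  induction l generalizing j with
  | nil => simp [pvLastIdx] at h
  | cons x t ih =>
    simp only [pvLastIdx] at h
    cases ht : pvLastIdx P t with
    | some k => rw [ht] at h; simp at h; have := ih k ht; simp [List.length_cons]; omega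
    | none =>
      rw [ht] at h
      by_cases hp : P x = true <;> simp [hp] at h
      simp [← h]

theorem pvLastIdx_map {α β : Type} (P : β → Bool) (f : α → β) (l : List α) :
    pvLastIdx P (l.map f) = pvLastIdx (fun x => P (f x)) l := by
  induction l with
  | nil => rfl
  | cons x t ih => simp only [List.map, pvLastIdx, ih]

theorem pvLastIdx_append_singleton {α : Type} (P : α → Bool) (l : List α) (x : α) :
    pvLastIdx P (l ++ [x]) = if P x then some l.length else pvLastIdx P l := by
  induction l with
  | nil => simp [pvLastIdx]
  | cons y t ih =>
    simp only [List.cons_append, pvLastIdx, ih]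
    by_cases hp : P x = true
    · simp [hp]
    · simp [hp]

theorem pvLastIdx_none_of_no_mem {α : Type} (P : α → Bool) (l : List α)
    (h : pvLastIdx P l = none) : ∀ m ∈ l, P m = false := by
  induction l with
  | nil => simp
  | cons x t ih =>
    simp only [pvLastIdx] at h
    cases ht : pvLastIdx P t with
    | some k => rw [ht] at h; simp at h
    | none =>
      rw [ht] at h
      intro m hm
      rcases List.mem_cons.mp hm with rfl | hm'
      · by_cases hp : P m = true
        · simp [hp] at h
        · simpa using hp
      · exact ih ht m hm'

-- characterization of A's backward scan
theorem pvAGo_eq (updated : List (PySem.Dict String String)) (p : String) :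
    ∀ n, n ≤ updated.length →
      pvAGo updated p n =
        match pvLastIdx (fun d => d.get? "role" == some "user") (updated.take n) with
        | some j => updated.set j (((updated[j]?).getD PySem.Dict.empty).insert "content" p)
        | none => updated := by
  intro n
  induction n with
  | zero => intro _; simp [pvAGo, pvLastIdx]
  | succ n ih =>
    intro hle
    have hn : n < updated.length := by omega
    have hget : updated[n]? = some updated[n] := List.getElem?_eq_getElem hn
    have htake : updated.take (n + 1) = updated.take n ++ [updated[n]] := by
      rw [List.take_succ, hget]; rfl
    rw [htake, pvLastIdx_append_singleton]
    have hlen : (updated.take n).length = n := List.length_take_of_le (le_of_lt hn)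
    simp only [pvAGo, hget]
    by_cases hp : (updated[n].get? "role" == some "user") = true
    · simp [hp, hlen, hget]
    · simp only [hp, if_false, Bool.false_eq_true]
      exact ih (le_of_lt hn)

-- characterization of B's forward fold
theorem pvFoldB_eq (p : String) :
    ∀ (l : List (List (String × String))) (s acc : Int),
      (PySem.List.enumerate l s).foldl
          (fun acc im => if (PySem.Dict.ofList im.2).get? "role" == some "user" then im.1 else acc) acc =
        match pvLastIdx (fun m => (PySem.Dict.ofList m).get? "role" == some "user") l with
        | some j => s + (j : Int)
        | none => acc := by
  intro l
  induction l with
  | nil => intro s acc; simp [PySem.List.enumerate_nil, pvLastIdx]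
  | cons x t ih =>
    intro s acc
    rw [PySem.List.enumerate_cons, List.foldl_cons, ih]
    simp only [pvLastIdx]
    cases ht : pvLastIdx (fun m => (PySem.Dict.ofList m).get? "role" == some "user") t with
    | some j => simp; ring
    | none =>
      by_cases hp : ((PySem.Dict.ofList x).get? "role" == some "user") = true
      · simp [ht, hp]
      · simp [ht, hp]

-- ===== VERDICT (by name: the statement is the Claim_ definition above) =====
theorem apply_user_prompt_override_py_spec : Claim_equal_apply_user_prompt_override_py := by
  intro messages p _hdom hpre
  unfold Spec_apply_user_prompt_override_py
  unfold apply_user_prompt_override_py apply_user_prompt_override_py_alt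
  simp only []
  set P : List (String × String) → Bool := fun m => (PySem.Dict.ofList m).get? "role" == some "user" with hP
  set ds := messages.map (fun m => PySem.Dict.ofList m) with hds
  have hlen : ds.length = messages.length := by simp [hds]
  have hA := pvAGo_eq ds p ds.length le_rfl
  rw [List.take_length] at hA
  have hidx : pvLastIdx (fun d => d.get? "role" == some "user") ds = pvLastIdx P messages := by
    rw [hds, pvLastIdx_map]
  rw [hidx] at hA
  have hB := pvFoldB_eq p messages 0 (-1)
  cases hcase : pvLastIdx P messages with
  | none =>
    exfalso
    obtain ⟨m, hm, hu⟩ := hpre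
    have := pvLastIdx_none_of_no_mem P messages hcase m hm
    rw [hP] at this; simp [hu] at this
  | some j =>
    have hj : j < messages.length := pvLastIdx_lt _ _ _ hcase
    rw [hcase] at hA hB
    rw [hA, hB]
    apply List.ext_getElem
    · simp [hlen]
    · intro k hk1 hk2
      simp only [List.length_map, List.length_set] at hk1
      have hkm : k < messages.length := by rw [hlen] at hk1; exact hk1
      have hjds : j < ds.length := by rw [hlen]; exact hj
      rw [List.getElem_map, List.getElem_map, PySem.List.getElem_enumerate]
      have hdk : ds[k] = PySem.Dict.ofList messages[k] := by simp [hds]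
      have hdj : ds[j]? = some (PySem.Dict.ofList messages[j]) := by
        rw [hds]; simp [hj]
      by_cases hkj : k = j
      · subst hkj
        rw [List.getElem_set_self, hdj]
        simp
      · rw [List.getElem_set_ne (by omega)]
        have : ((0 + (k : Int)) == (0 + (j : Int))) = false := by
          simp; omega
        rw [this]
        simp [hdk]
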